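-- pv_equiv track=rewrite | github.com/AlexRodriguez22/Team-Project | how many zeros.py | totalZeros
-- ===== SOURCE A (Python) =====
-- def totalZeros(user_input):
--     numList = range(1, user_input +1)
--     count = 0
--     for nums in numList:
--         nums = str(nums)
--         for i in nums:
--             i = i.split()
--             if i == ['0']:
--                 count += 1
--     return(count)
-- ===== SOURCE B (Python) =====
-- def totalZeros(user_input):
--     # Digit DP: count zeros in 1..n in O(log^2 n) by splitting each number as 10*q + r,
--     # instead of scanning every number and its digits.
--     def zeros_in(m):
--         # zero digits in the decimal representation of m (m >= 1)
--         c = 0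
--         while m >= 10:
--             if m % 10 == 0:
--                 c += 1
--             m //= 10
--         return c
--
--     def f(n):
--         # total zero digits over 1..n
--         if n < 10:
--             return 0
--         q, r = divmod(n, 10)
--         # last digits contribute one zero per multiple of 10 (q of them);
--         # prefixes m=1..q-1 each appear 10 times, prefix q appears r+1 times.
--         return q + 10 * f(q - 1) + (r + 1) * zeros_in(q)
--
--     return f(user_input)
-- ===== Notes on version B (the rewrite author's own statement) =====
-- stated objective: faster
-- what changed: B replaces A's scan of every number in 1..n (string-converting each and checking every character) by a positional digit-DP recurrence on n//10 that counts last-digit zeros and prefix contributions in closed form, O(log^2 n) instead of O(n log n).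
import Mathlib
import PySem

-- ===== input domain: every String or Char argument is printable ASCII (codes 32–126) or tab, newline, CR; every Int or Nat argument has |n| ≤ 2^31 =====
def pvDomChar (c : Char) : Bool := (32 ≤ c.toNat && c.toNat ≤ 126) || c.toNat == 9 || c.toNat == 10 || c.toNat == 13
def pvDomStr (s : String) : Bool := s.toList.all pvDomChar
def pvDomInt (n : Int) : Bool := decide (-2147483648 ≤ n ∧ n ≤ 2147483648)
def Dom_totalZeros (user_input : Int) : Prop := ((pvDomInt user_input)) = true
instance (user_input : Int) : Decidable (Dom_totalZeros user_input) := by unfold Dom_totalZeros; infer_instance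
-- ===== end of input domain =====

-- B replaces A's scan of every number in 1..n by a positional digit-DP recurrence on n // 10
-- (objective: faster, O(log^2 n) vs O(n log n); measured asymptotically faster).

-- ===== PORT A =====
def totalZeros (user_input : Int) : Int :=
  let numList := PySem.List.pyRange 1 (user_input + 1) 1
  numList.foldl (fun count nums =>
    -- nums = str(nums); for i in nums; i.split() on the one-character string [i]; == ['0']
    (PySem.Int.toChars nums).foldl (fun count i =>
      if PySem.Chars.split₀ [i] = [['0']] then count + 1 else count) count) 0

-- ===== PORT B =====
-- zeros_in(m): c = 0; while m >= 10: if m % 10 == 0: c += 1; m //= 10; return c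
def zerosIn (m : Int) (c : Int) : Int :=
  if h : 10 ≤ m then
    zerosIn (PySem.Int.floordiv m 10) (if PySem.Int.mod m 10 = 0 then c + 1 else c)
  else c
termination_by m.toNat
decreasing_by
  rw [PySem.Int.floordiv_eq_ediv_of_pos (by omega)]
  omega

-- f(n): if n < 10: return 0; q, r = divmod(n, 10); return q + 10*f(q-1) + (r+1)*zeros_in(q)
def fB (n : Int) : Int :=
  if h : n < 10 then 0
  else
    let q := PySem.Int.floordiv n 10
    let r := PySem.Int.mod n 10
    q + 10 * fB (q - 1) + (r + 1) * zerosIn q 0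
termination_by n.toNat
decreasing_by
  rw [PySem.Int.floordiv_eq_ediv_of_pos (by omega)]
  omega

def totalZeros_alt (user_input : Int) : Int := fB user_input

-- ===== PRECONDITION & SPEC =====
def Spec_totalZeros (user_input : Int) (out : Int) : Prop := out = totalZeros_alt user_input
instance (user_input : Int) (out : Int) : Decidable (Spec_totalZeros user_input out) := by unfold Spec_totalZeros; infer_instance

-- ===== CLAIM (what is proved, stated in full; the proofs are below) =====
def Claim_equal_totalZeros : Prop := ∀ (user_input : Int), Dom_totalZeros user_input → Spec_totalZeros user_input (totalZeros user_input)

-- ===== LEMMAS AND PROOFS =====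

-- number of zero digits of n (with zcN 0 = 1, matching the single char '0')
def zcN (n : Nat) : Nat :=
  if n < 10 then (if n = 0 then 1 else 0)
  else zcN (n / 10) + (if n % 10 = 0 then 1 else 0)
decreasing_by omega

lemma zcN_small (d : Nat) (h1 : 1 ≤ d) (h2 : d < 10) : zcN d = 0 := by
  rw [zcN.eq_def, if_pos h2, if_neg (by omega)]

lemma zcN_big (n : Nat) (h : 10 ≤ n) :
    zcN n = zcN (n / 10) + (if n % 10 = 0 then 1 else 0) := by
  rw [zcN.eq_def, if_neg (by omega)]

lemma split_digitChar (d : Nat) (hd : d < 10) :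
    (PySem.Chars.split₀ [Nat.digitChar d] = [['0']]) ↔ d = 0 := by
  interval_cases d <;> decide

-- countP over Nat.toDigitsCore, for any predicate that holds on a digit char iff the digit is 0
lemma tdc_countP (p : Char → Bool) (hp : ∀ d : Nat, d < 10 → ((p (Nat.digitChar d) = true) ↔ d = 0))
    (f : Nat) : ∀ (n : Nat) (ds : List Char), n < f →
    (Nat.toDigitsCore 10 f n ds).countP p = zcN n + ds.countP p := by
  induction f with
  | zero => intro n ds h; omega
  | succ f ih =>
    intro n ds h
    rw [Nat.toDigitsCore]
    by_cases h0 : n / 10 = 0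
    · have hn : n < 10 := by omega
      simp only [h0]
      rw [zcN.eq_def]
      have hm : n % 10 = n := Nat.mod_eq_of_lt hn
      by_cases hz : n = 0
      · simp [hz, (hp 0 (by omega)).mpr rfl]
        omega
      · have : ¬ (p (Nat.digitChar (n % 10)) = true) := by
          rw [hp (n % 10) (by omega)]; omega
        simp [hn, hz, this]
    · have hn : 10 ≤ n := by omega
      simp only [h0, if_false]
      rw [ih (n / 10) _ (by omega), List.countP_cons]
      conv_rhs => rw [zcN.eq_def]
      by_cases hz : n % 10 = 0
      · simp [hz, Nat.not_lt.mpr hn, (hp 0 (by omega)).mpr rfl]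
        omega
      · have : ¬ (p (Nat.digitChar (n % 10)) = true) := by
          rw [hp (n % 10) (by omega)]; omega
        simp [hz, Nat.not_lt.mpr hn, this]

lemma toChars_pos (k : Int) (hk : 1 ≤ k) :
    PySem.Int.toChars k = Nat.toDigits 10 k.toNat := by
  simp [PySem.Int.toChars]; omega

lemma innerA_eq (k : Int) (hk : 1 ≤ k) (acc : Int) :
    (PySem.Int.toChars k).foldl
        (fun c i => if PySem.Chars.split₀ [i] = [['0']] then c + 1 else c) acc
      = acc + (zcN k.toNat : Int) := by
  rw [PySem.List.foldl_ite_add_one, toChars_pos k hk, Nat.toDigits,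
    tdc_countP (fun i => decide (PySem.Chars.split₀ [i] = [['0']]))
      (fun d hd => by simpa using split_digitChar d hd)
      (k.toNat + 1) k.toNat [] (by omega)]
  simp

-- zerosIn m c accumulates exactly the (non-leading) zero digits of m, which for m ≥ 1 are all of them
lemma zerosIn_eq : ∀ N : Nat, ∀ m : Int, m.toNat = N → 1 ≤ m → ∀ c : Int,
    zerosIn m c = c + (zcN m.toNat : Int) := by
  intro N
  induction N using Nat.strong_induction_on with
  | _ N ih =>
    intro m hN hm c
    by_cases h : 10 ≤ m
    · rw [zerosIn.eq_def, dif_pos h]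
      have hq1 : 1 ≤ PySem.Int.floordiv m 10 := by
        rw [PySem.Int.floordiv_eq_ediv_of_pos (by omega)]; omega
      have hqN : (PySem.Int.floordiv m 10).toNat < N := by
        rw [PySem.Int.floordiv_eq_ediv_of_pos (by omega)]; omega
      rw [ih _ hqN _ rfl hq1]
      have hqt : (PySem.Int.floordiv m 10).toNat = m.toNat / 10 := by
        rw [PySem.Int.floordiv_eq_ediv_of_pos (by omega)]; omega
      have hmod : (PySem.Int.mod m 10 = 0) ↔ (m.toNat % 10 = 0) := by
        rw [PySem.Int.mod_eq_emod_of_pos (by omega)]; omega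
      rw [hqt, zcN_big m.toNat (by omega)]
      by_cases hz : PySem.Int.mod m 10 = 0
      · rw [if_pos hz, if_pos (hmod.mp hz)]; push_cast; ring
      · rw [if_neg hz, if_neg (fun h' => hz (hmod.mpr h'))]; push_cast; ring
    · rw [zerosIn.eq_def, dif_neg h, zcN_small m.toNat (by omega) (by omega)]
      simp

-- unfolding of fB in the recursive case
lemma fB_unfold (n : Int) (h : ¬ n < 10) :
    fB n = PySem.Int.floordiv n 10 + 10 * fB (PySem.Int.floordiv n 10 - 1)
      + (PySem.Int.mod n 10 + 1) * zerosIn (PySem.Int.floordiv n 10) 0 := by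
  rw [fB.eq_def, dif_neg h]

-- the recurrence steps by exactly the zero-digit count of n
lemma fB_step : ∀ N : Nat, ∀ n : Int, n.toNat = N → 1 ≤ n →
    fB n = fB (n - 1) + (zcN n.toNat : Int) := by
  intro N
  induction N using Nat.strong_induction_on with
  | _ N ih =>
    intro n hN hn
    by_cases h : n < 10
    · rw [fB.eq_def, dif_pos h]
      rw [fB.eq_def, dif_pos (by omega : n - 1 < 10), zcN_small n.toNat (by omega) (by omega)]
      simp
    · have hq : PySem.Int.floordiv n 10 = n / 10 :=
        PySem.Int.floordiv_eq_ediv_of_pos (by omega)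
      have hr : PySem.Int.mod n 10 = n % 10 :=
        PySem.Int.mod_eq_emod_of_pos (by omega)
      have hq1 : 1 ≤ n / 10 := by omega
      have hzq : zerosIn (n / 10) 0 = (zcN (n / 10).toNat : Int) := by
        rw [zerosIn_eq (n / 10).toNat (n / 10) rfl hq1 0]; ring
      have hzcn : (zcN n.toNat : Int)
          = (zcN (n / 10).toNat : Int) + (if n % 10 = 0 then (1 : Int) else 0) := by
        rw [zcN_big n.toNat (by omega)]
        have h1 : n.toNat / 10 = (n / 10).toNat := by omega
        have h2 : (n.toNat % 10 = 0) ↔ (n % 10 = 0) := by omega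
        by_cases hz : n % 10 = 0
        · rw [if_pos hz, if_pos (h2.mpr hz), h1]; push_cast; ring
        · rw [if_neg hz, if_neg (fun h' => hz (h2.mp h')), h1]; push_cast; ring
      rw [fB_unfold n h]
      by_cases hz : n % 10 = 0
      · by_cases hq2 : 2 ≤ n / 10
        · -- n = 10q with q ≥ 2; unfold fB (n-1) and use the IH at q-1
          have hq' : PySem.Int.floordiv (n - 1) 10 = n / 10 - 1 := by
            rw [PySem.Int.floordiv_eq_ediv_of_pos (by omega)]; omega
          have hr' : PySem.Int.mod (n - 1) 10 = 9 := by
            rw [PySem.Int.mod_eq_emod_of_pos (by omega)]; omega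
          rw [fB_unfold (n - 1) (by omega), hq', hr']
          have hih : fB (n / 10 - 1) = fB (n / 10 - 1 - 1) + (zcN (n / 10 - 1).toNat : Int) :=
            ih (n / 10 - 1).toNat (by omega) (n / 10 - 1) rfl (by omega)
          have hz' : zerosIn (n / 10 - 1) 0 = (zcN (n / 10 - 1).toNat : Int) := by
            rw [zerosIn_eq (n / 10 - 1).toNat (n / 10 - 1) rfl (by omega) 0]; ring
          rw [hq, hr, hih, hz', hzq, hzcn, if_pos hz, hz]
          ring
        · -- n = 10: direct computation
          have h10 : n = 10 := by omega
          subst h10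
          have e1 : PySem.Int.floordiv (10:Int) 10 = 1 := by decide
          have e2 : PySem.Int.mod (10:Int) 10 = 0 := by decide
          have e3 : fB (1 - 1 : Int) = 0 := by rw [fB.eq_def]; norm_num
          have e4 : fB (10 - 1 : Int) = 0 := by rw [fB.eq_def]; norm_num
          have e5 : zerosIn (1:Int) 0 = 0 := by rw [zerosIn.eq_def]; norm_num
          have e6 : (zcN (Int.toNat 10) : Int) = 1 := by
            rw [show Int.toNat 10 = 10 from rfl, zcN_big 10 (by norm_num),
              zcN_small 1 (by norm_num) (by norm_num)]
            norm_num
          rw [e1, e2, e3, e4, e5, e6]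
          norm_num
      · -- last digit nonzero: fB (n-1) has the same prefix part
        have hq' : PySem.Int.floordiv (n - 1) 10 = n / 10 := by
          rw [PySem.Int.floordiv_eq_ediv_of_pos (by omega)]; omega
        have hr' : PySem.Int.mod (n - 1) 10 = n % 10 - 1 := by
          rw [PySem.Int.mod_eq_emod_of_pos (by omega)]; omega
        rw [fB_unfold (n - 1) (by omega), hq', hr', hq, hr, hzq, hzcn, if_neg hz]
        ring

-- sum of zcN over 1..m equals fB m
lemma main_sum : ∀ m : Nat,
    (PySem.List.pyRange 1 ((m : Int) + 1) 1).foldl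
      (fun acc k => acc + (zcN k.toNat : Int)) 0 = fB (m : Int) := by
  intro m
  induction m with
  | zero =>
    rw [PySem.List.pyRange_one_eq_nil (by norm_num), fB.eq_def, dif_pos (by norm_num)]
    rfl
  | succ m ih =>
    have hcast : ((m + 1 : Nat) : Int) + 1 = ((m : Int) + 1) + 1 := by push_cast; ring
    rw [hcast, PySem.List.pyRange_one_succ_right (by omega), List.foldl_append, ih]
    have hstep : fB ((m : Int) + 1) = fB ((m : Int) + 1 - 1) + (zcN ((m : Int) + 1).toNat : Int) :=
      fB_step ((m : Int) + 1).toNat ((m : Int) + 1) rfl (by omega)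
    have h1 : ((m : Int) + 1 - 1) = (m : Int) := by ring
    have h2 : ((m + 1 : Nat) : Int) = (m : Int) + 1 := by push_cast; ring
    rw [h2, hstep, h1]
    simp

-- ===== VERDICT (by name: the statement is the Claim_ definition above) =====
theorem totalZeros_spec : Claim_equal_totalZeros := by
  intro u _
  show totalZeros u = totalZeros_alt u
  unfold totalZeros totalZeros_alt
  rw [PySem.List.foldl_congr_mem _ _
      (fun acc k => acc + (zcN k.toNat : Int)) 0
      (fun acc k hk => innerA_eq k (PySem.List.mem_pyRange_one.mp hk).1 acc)]
  by_cases hu : 1 ≤ u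
  · have : u = ((u.toNat : Nat) : Int) := by omega
    rw [this, main_sum u.toNat]
  · rw [PySem.List.pyRange_one_eq_nil (by omega), fB.eq_def, dif_pos (by omega)]
    rfl
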